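-- pv_equiv track=rewrite | github.com/volNjin/crawlers | sentiment_analyzer.py | automatic_labeling
-- ===== SOURCE A (Python) =====
-- def automatic_labeling(lda_topics, predefined_keywords):
--     topic_labels = {}
--     for topic, words in lda_topics.items():
--         matched_keywords = []
--         for keyword, keyword_list in predefined_keywords.items():
--             if any(word in keyword_list for word in words):
--                 matched_keywords.append(keyword)
--         if matched_keywords:
--             topic_labels[topic] = " ".join(matched_keywords)
--         else:
--             topic_labels[topic] = "Uncategorized"
--     return topic_labels
-- ===== SOURCE B (Python) =====
-- def automatic_labeling(lda_topics, predefined_keywords):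
--     # inverted index: word -> list of keyword positions
--     names = list(predefined_keywords)
--     index = {}
--     for i, keyword_list in enumerate(predefined_keywords.values()):
--         for w in keyword_list:
--             index.setdefault(w, []).append(i)
--     topic_labels = {}
--     for topic, words in lda_topics.items():
--         hit = set()
--         for w in words:
--             hit.update(index.get(w, []))
--         if hit:
--             topic_labels[topic] = " ".join(names[i] for i in sorted(hit))
--         else:
--             topic_labels[topic] = "Uncategorized"
--     return topic_labels
-- ===== Notes on version B (the rewrite author's own statement) =====
-- stated objective: faster
-- what changed: Instead of scanning every keyword list for every topic (any-membership per topic x keyword), B builds an inverted index word->keyword positions once, collects the hit positions per topic in one pass over its words, and emits the matched keyword names in original order via sorted positions.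
import Mathlib
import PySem

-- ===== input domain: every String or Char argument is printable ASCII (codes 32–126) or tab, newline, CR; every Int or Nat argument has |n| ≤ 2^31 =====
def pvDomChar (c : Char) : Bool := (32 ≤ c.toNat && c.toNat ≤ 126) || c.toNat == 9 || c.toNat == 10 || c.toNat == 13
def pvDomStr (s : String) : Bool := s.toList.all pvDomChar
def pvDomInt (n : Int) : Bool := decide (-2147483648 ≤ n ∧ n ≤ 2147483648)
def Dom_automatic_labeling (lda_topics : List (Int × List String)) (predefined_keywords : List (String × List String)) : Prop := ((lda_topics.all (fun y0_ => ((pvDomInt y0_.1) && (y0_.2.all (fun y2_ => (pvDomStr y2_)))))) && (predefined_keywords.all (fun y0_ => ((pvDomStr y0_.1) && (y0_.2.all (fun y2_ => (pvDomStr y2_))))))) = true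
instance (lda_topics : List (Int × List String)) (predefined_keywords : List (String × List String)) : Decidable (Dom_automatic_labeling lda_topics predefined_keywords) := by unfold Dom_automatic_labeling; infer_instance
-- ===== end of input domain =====

-- B replaces A's per-topic scan over every keyword list by an inverted index word → keyword
-- positions built once (objective: faster). Return-value equivalence; neither version mutates
-- its arguments.

-- ===== PORT A =====
-- dict inputs: the assoc lists are turned into PySem.Dicts (last duplicate key wins), exactly as
-- Python builds the dict arguments.
def automatic_labeling (lda_topics : List (Int × List String)) (predefined_keywords : List (String × List String)) : List (Int × String) :=
  let topics := PySem.Dict.ofList lda_topics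
  let kws := PySem.Dict.ofList predefined_keywords
  (topics.items.foldl (fun (labels : PySem.Dict Int String) tw =>
      let matched := kws.items.foldl (fun (acc : List String) kv =>
          if tw.2.any (fun w => kv.2.contains w) then acc ++ [kv.1] else acc) []
      if !matched.isEmpty then labels.insert tw.1 (PySem.Str.join " " matched)
      else labels.insert tw.1 "Uncategorized") PySem.Dict.empty).items

-- ===== PORT B =====
-- index.setdefault(w, []).append(i) is ported as Dict.modify w [] (· ++ [i]), its exact PySem form.
def automatic_labeling_alt (lda_topics : List (Int × List String)) (predefined_keywords : List (String × List String)) : List (Int × String) :=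
  let topics := PySem.Dict.ofList lda_topics
  let kws := PySem.Dict.ofList predefined_keywords
  let names := kws.items.map (fun kv => kv.1)
  let index : PySem.Dict String (List Int) := (PySem.List.enumerate kws.items 0).foldl
      (fun (d : PySem.Dict String (List Int)) ik =>
        ik.2.2.foldl (fun d w => d.modify w [] (fun l => l ++ [ik.1])) d)
      PySem.Dict.empty
  (topics.items.foldl (fun (labels : PySem.Dict Int String) tw =>
      let hit : PySem.Set Int := tw.2.foldl (fun (s : PySem.Set Int) w =>
          PySem.Set.update s (index.getD w [])) (PySem.Set.empty : PySem.Set Int)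
      if !hit.isEmpty then
        labels.insert tw.1 (PySem.Str.join " "
          ((PySem.List.sorted hit (fun x => x) false).map (fun i => PySem.List.pyGetD names i "")))
      else labels.insert tw.1 "Uncategorized") PySem.Dict.empty).items

-- ===== PRECONDITION & SPEC =====
def Spec_automatic_labeling (lda_topics : List (Int × List String)) (predefined_keywords : List (String × List String)) (out : List (Int × String)) : Prop := out = automatic_labeling_alt lda_topics predefined_keywords
instance (lda_topics : List (Int × List String)) (predefined_keywords : List (String × List String)) (out : List (Int × String)) : Decidable (Spec_automatic_labeling lda_topics predefined_keywords out) := by unfold Spec_automatic_labeling; infer_instance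

-- ===== CLAIM (what is proved, stated in full; the proofs are below) =====
def Claim_equal_automatic_labeling : Prop := ∀ (lda_topics : List (Int × List String)) (predefined_keywords : List (String × List String)), Dom_automatic_labeling lda_topics predefined_keywords → Spec_automatic_labeling lda_topics predefined_keywords (automatic_labeling lda_topics predefined_keywords)

-- ===== LEMMAS AND PROOFS =====

-- B's inverted index, and the word/position pairs it is built from
def pvIndex (kvs : List (String × List String)) : PySem.Dict String (List Int) :=
  (PySem.List.enumerate kvs 0).foldl
    (fun (d : PySem.Dict String (List Int)) ik =>
      ik.2.2.foldl (fun d w => d.modify w [] (fun l => l ++ [ik.1])) d)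
    PySem.Dict.empty

def pvPairs (kvs : List (String × List String)) : List (String × Int) :=
  (PySem.List.enumerate kvs 0).flatMap (fun ik => ik.2.2.map (fun v => (v, ik.1)))

lemma pvIndex_getD (kvs : List (String × List String)) (w : String) :
    (pvIndex kvs).getD w [] = ((pvPairs kvs).filter (fun p => p.1 == w)).map (fun p => p.2) := by
  have h : pvIndex kvs =
      (pvPairs kvs).foldl (fun d p => d.modify p.1 [] (fun l => l ++ [p.2])) PySem.Dict.empty := by
    unfold pvIndex pvPairs
    rw [List.foldl_flatMap]
    apply List.foldl_ext
    intro d ik _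
    rw [List.foldl_map]
  rw [h, PySem.Dict.getD_foldl_modify_append]
  simp [PySem.Dict.getD_empty]

lemma pvMem_index (kvs : List (String × List String)) (w : String) (i : Int) :
    i ∈ (pvIndex kvs).getD w [] ↔ ∃ k, ∃ _ : k < kvs.length, i = (k : Int) ∧ w ∈ kvs[k].2 := by
  rw [pvIndex_getD]
  constructor
  · intro h
    rw [List.mem_map] at h
    obtain ⟨p, hp, rfl⟩ := h
    rw [List.mem_filter, beq_iff_eq] at hp
    obtain ⟨hmem, hw⟩ := hp
    rw [pvPairs, List.mem_flatMap] at hmem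
    obtain ⟨ik, hik, hpmem⟩ := hmem
    rw [PySem.List.mem_enumerate_iff] at hik
    obtain ⟨k, hk, rfl⟩ := hik
    rw [List.mem_map] at hpmem
    obtain ⟨v, hv, rfl⟩ := hpmem
    exact ⟨k, hk, by simp, by rwa [show v = w from hw] at hv⟩
  · rintro ⟨k, hk, rfl, hw⟩
    rw [List.mem_map]
    refine ⟨(w, (k : Int)), ?_, rfl⟩
    rw [List.mem_filter]
    refine ⟨?_, by simp⟩
    rw [pvPairs, List.mem_flatMap]
    exact ⟨((k : Int), kvs[k]), by rw [PySem.List.mem_enumerate_iff]; exact ⟨k, hk, by simp⟩,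
      List.mem_map_of_mem (f := fun v => (v, (k : Int))) hw⟩

-- membership and nodup of the hit set accumulated over a topic's words
lemma pvMem_hit_fold (f : String → List Int) (words : List String) (s : PySem.Set Int) (i : Int) :
    i ∈ words.foldl (fun s w => PySem.Set.update s (f w)) s ↔ i ∈ s ∨ ∃ w ∈ words, i ∈ f w := by
  induction words generalizing s with
  | nil => simp
  | cons w ws ih =>
    simp only [List.foldl_cons, ih, PySem.Set.mem_update, List.mem_cons]
    constructor
    · rintro ((h | h) | ⟨w', hw', h⟩)
      · exact Or.inl h
      · exact Or.inr ⟨w, Or.inl rfl, h⟩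
      · exact Or.inr ⟨w', Or.inr hw', h⟩
    · rintro (h | ⟨w', (rfl | hw'), h⟩)
      · exact Or.inl (Or.inl h)
      · exact Or.inl (Or.inr h)
      · exact Or.inr ⟨w', hw', h⟩

lemma pvNodup_hit_fold (f : String → List Int) (words : List String) (s : PySem.Set Int)
    (hs : s.Nodup) : (words.foldl (fun s w => PySem.Set.update s (f w)) s).Nodup := by
  induction words generalizing s with
  | nil => exact hs
  | cons w ws ih => exact ih _ (PySem.Set.nodup_update s (f w) hs)

-- the strictly increasing list of matched keyword positions
def pvZS (kvs : List (String × List String)) (q : (String × List String) → Bool) : List Int :=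
  ((PySem.List.enumerate kvs 0).filter (fun ik => q ik.2)).map (fun ik => ik.1)

lemma pvZS_pairwise (kvs : List (String × List String)) (q : (String × List String) → Bool) :
    (pvZS kvs q).Pairwise (· < ·) := by
  unfold pvZS
  rw [List.pairwise_map]
  exact (PySem.List.pairwise_lt_enumerate kvs 0).filter _

lemma pvZS_nodup (kvs : List (String × List String)) (q : (String × List String) → Bool) :
    (pvZS kvs q).Nodup :=
  (pvZS_pairwise kvs q).imp (fun h => ne_of_lt h)

lemma pvMem_ZS (kvs : List (String × List String)) (q : (String × List String) → Bool) (i : Int) :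
    i ∈ pvZS kvs q ↔ ∃ k, ∃ _ : k < kvs.length, i = (k : Int) ∧ q kvs[k] := by
  unfold pvZS
  simp only [List.mem_map, List.mem_filter, PySem.List.mem_enumerate_iff]
  constructor
  · rintro ⟨ik, ⟨⟨k, hk, rfl⟩, hq⟩, hi⟩
    exact ⟨k, hk, by simp [← hi], hq⟩
  · rintro ⟨k, hk, rfl, hq⟩
    exact ⟨((k : Int), kvs[k]), ⟨⟨k, hk, by simp⟩, hq⟩, rfl⟩

-- B's hit set, sorted, is exactly pvZS
lemma pvSorted_hit (kvs : List (String × List String)) (words : List String) :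
    PySem.List.sorted
      (words.foldl (fun (s : PySem.Set Int) w => PySem.Set.update s ((pvIndex kvs).getD w [])) PySem.Set.empty)
      (fun x => x) false
    = pvZS kvs (fun kv => words.any (fun w => kv.2.contains w)) := by
  apply PySem.List.sorted_eq_of_perm_of_pairwise_lt
  · refine (List.perm_ext_iff_of_nodup (pvZS_nodup _ _)
      (pvNodup_hit_fold _ _ _ List.nodup_nil)).2 (fun i => ?_)
    rw [pvMem_ZS, pvMem_hit_fold]
    simp only [List.mem_nil_iff, false_or, pvMem_index, List.any_eq_true, List.contains_iff_mem]
    constructor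
    · rintro ⟨k, hk, rfl, w, hw, hwk⟩
      exact ⟨w, hw, k, hk, rfl, hwk⟩
    · rintro ⟨w, hw, k, hk, rfl, hwk⟩
      exact ⟨k, hk, rfl, w, hw, hwk⟩
  · exact pvZS_pairwise _ _

-- pushing any function through the filtered enumeration
lemma pvEnum_filter_map {α β : Type} (q : α → Bool) (f : α → β) (kvs : List α) (s : Int) :
    (((PySem.List.enumerate kvs s).filter (fun ik => q ik.2)).map (fun ik => f ik.2))
      = (kvs.filter q).map f := by
  induction kvs generalizing s with
  | nil => simp [PySem.List.enumerate_nil]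
  | cons kv kvs ih =>
    rw [PySem.List.enumerate_cons]
    by_cases h : q kv
    · simp [h, ih]
    · simp [h, ih]

-- reading the keyword names off pvZS gives A's matched list
lemma pvNames_ZS (kvs : List (String × List String)) (q : (String × List String) → Bool) :
    (pvZS kvs q).map (fun i => PySem.List.pyGetD (kvs.map (fun kv => kv.1)) i "")
      = (kvs.filter q).map (fun kv => kv.1) := by
  unfold pvZS
  rw [List.map_map, ← pvEnum_filter_map q (fun kv => kv.1) kvs 0]
  apply List.map_congr_left
  intro ik hik
  have hmem := List.mem_of_mem_filter hik
  rw [PySem.List.mem_enumerate_iff] at hmem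
  obtain ⟨k, hk, rfl⟩ := hmem
  simp only [Function.comp_apply, zero_add, PySem.List.pyGetD_natCast]
  rw [List.getD_eq_getElem _ _ (by simpa using hk)]
  simp

-- the per-topic label computed by A equals the one computed by B
lemma pvStep_eq (kvs : List (String × List String)) (labels : PySem.Dict Int String)
    (tw : Int × List String) :
    (if !(kvs.foldl (fun (acc : List String) kv =>
          if tw.2.any (fun w => kv.2.contains w) then acc ++ [kv.1] else acc) []).isEmpty then
        labels.insert tw.1 (PySem.Str.join " " (kvs.foldl (fun (acc : List String) kv =>
          if tw.2.any (fun w => kv.2.contains w) then acc ++ [kv.1] else acc) []))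
      else labels.insert tw.1 "Uncategorized")
    = (if !(tw.2.foldl (fun (s : PySem.Set Int) w =>
          PySem.Set.update s ((pvIndex kvs).getD w [])) (PySem.Set.empty : PySem.Set Int)).isEmpty then
        labels.insert tw.1 (PySem.Str.join " "
          ((PySem.List.sorted (tw.2.foldl (fun (s : PySem.Set Int) w =>
              PySem.Set.update s ((pvIndex kvs).getD w [])) (PySem.Set.empty : PySem.Set Int))
            (fun x => x) false).map
            (fun i => PySem.List.pyGetD (kvs.map (fun kv => kv.1)) i "")))
      else labels.insert tw.1 "Uncategorized") := by
  set q : (String × List String) → Bool := fun kv => tw.2.any (fun w => kv.2.contains w) with hq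
  set hit : PySem.Set Int := tw.2.foldl (fun (s : PySem.Set Int) w =>
    PySem.Set.update s ((pvIndex kvs).getD w [])) (PySem.Set.empty : PySem.Set Int) with hhit
  have hmatched : kvs.foldl (fun (acc : List String) kv =>
      if q kv then acc ++ [kv.1] else acc) [] = (kvs.filter q).map (fun kv => kv.1) :=
    PySem.List.foldl_append_if q (fun kv => kv.1) kvs []
  have hsorted : PySem.List.sorted hit (fun x => x) false = pvZS kvs q := pvSorted_hit kvs tw.2
  have hlen : (pvZS kvs q).length = (kvs.filter q).length := by
    have := congrArg List.length (pvEnum_filter_map q (fun kv => kv.1) kvs 0)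
    simpa [pvZS] using this
  have hzs_nil : hit = ([] : List Int) ↔ pvZS kvs q = [] := by
    rw [← hsorted, PySem.List.sorted_eq_nil_iff]
  have hfil_nil : pvZS kvs q = [] ↔ kvs.filter q = [] := by
    rw [← List.length_eq_zero_iff, ← @List.length_eq_zero_iff _ (kvs.filter q), hlen]
  rw [hmatched, hsorted, pvNames_ZS]
  have hiff : (List.map (fun kv => kv.1) (List.filter q kvs)) = [] ↔ hit = ([] : List Int) := by
    rw [List.map_eq_nil_iff, ← hfil_nil, ← hzs_nil]
  by_cases hcase : hit = ([] : List Int)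
  · have h1 : (List.map (fun kv => kv.1) (List.filter q kvs)).isEmpty = true := by
      simp [hiff.2 hcase]
    have h2 : hit.isEmpty = true := by simp [hcase]
    rw [h1, h2]
  · have h1 : (List.map (fun kv => kv.1) (List.filter q kvs)).isEmpty = false := by
      simpa using mt hiff.1 hcase
    have h2 : hit.isEmpty = false := by simpa using hcase
    rw [h1, h2]

-- ===== VERDICT (by name: the statement is the Claim_ definition above) =====
theorem automatic_labeling_spec : Claim_equal_automatic_labeling := by
  intro lda_topics predefined_keywords _
  unfold Spec_automatic_labeling
  simp only [automatic_labeling, automatic_labeling_alt]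
  apply congrArg PySem.Dict.items
  apply List.foldl_ext
  intro labels tw _
  exact pvStep_eq (PySem.Dict.ofList predefined_keywords).items labels tw
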